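-- pv_equiv track=rewrite | github.com/wandafulworld/Cayley_Tree | src/cayleytree/IsotropicTrees.py | _tree_edges
-- ===== SOURCE A (Python) =====
-- def _tree_edges(n, r):
--     if n == 0:
--         return
--     # helper function for trees
--     # yields edges in rooted tree at 0 with n nodes and branching ratio r
--     nodes = iter(range(n))
--     parents = [next(nodes)]  # stack of max length r
--
--     first_time = True
--     r = r + 1
--
--     while parents:
--         source = parents.pop(0)
--         for i in range(r):
--             try:
--                 target = next(nodes)
--                 parents.append(target)
--                 yield source, target
--             except StopIteration:
--                 break
--         if first_time:
--             r = r - 1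
--         first_time = False
-- ===== SOURCE B (Python) =====
-- def _tree_edges(n, r):
--     # Closed-form parent function instead of a BFS queue: node 0 gets its first
--     # r+1 children 1..r+1; every later node t has parent 1 + (t - (r+2)) // r.
--     if r >= 1:
--         for t in range(1, n):
--             parent = 0 if t <= r + 1 else 1 + (t - (r + 2)) // r
--             yield parent, t
--     else:
--         # r <= 0: the BFS hands out at most one edge (0, 1), when n >= 2 and r == 0
--         for t in range(1, min(r + 2, n)):
--             yield 0, t
-- ===== Notes on version B (the rewrite author's own statement) =====
-- stated objective: faster
-- what changed: Replaces the BFS queue/iterator simulation with a direct closed-form parent formula: each target t in range(1, n) is paired with parent 0 (for t <= r+1) or 1 + (t-(r+2))//r, so no queue, no iterator, no mutable state.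
import Mathlib
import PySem

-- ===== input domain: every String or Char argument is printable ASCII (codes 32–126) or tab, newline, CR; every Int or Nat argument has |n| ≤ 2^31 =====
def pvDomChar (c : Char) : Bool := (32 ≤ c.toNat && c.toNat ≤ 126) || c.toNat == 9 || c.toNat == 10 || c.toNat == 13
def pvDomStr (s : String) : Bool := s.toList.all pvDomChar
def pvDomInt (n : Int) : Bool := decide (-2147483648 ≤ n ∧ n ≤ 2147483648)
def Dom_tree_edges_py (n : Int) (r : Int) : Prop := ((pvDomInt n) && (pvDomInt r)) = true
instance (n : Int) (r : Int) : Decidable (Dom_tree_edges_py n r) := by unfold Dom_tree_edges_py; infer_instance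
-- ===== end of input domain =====

-- B drops A's BFS queue/iterator simulation for a closed-form parent formula per target
-- (removing the quadratic parents.pop(0)); same return value on Pre_ (n ≥ 0); A is a
-- generator, the equivalence is about the yielded sequence of edges.

-- ===== PORT A =====
-- Python's 'nodes = iter(range(n))' is lazy: ported as the iterator's current position pos
-- (next(nodes) = pos if pos < n, else StopIteration), never materializing range(n).
-- inner 'for i in range(r): try: target = next(nodes) …': cnt = remaining iterations;
-- returns the updated (pos, queue back, yields); StopIteration = pos ≥ n → break.
-- Python's parents list (used purely as a FIFO: pop(0) / append) is ported as the standard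
-- two-list queue (front, back: append = cons to back, pop = head of front, refilling front
-- from back.reverse when empty), and the yielded edges are accumulated reversed and reversed
-- on return — same elements in the same order, step for step.
def pvInnerA (cnt : Nat) (source : Int) (pos n : Int) (back : List Int)
    (accRev : List (List Int)) : Int × List Int × List (List Int) :=
  match cnt with
  | 0 => (pos, back, accRev)
  | c + 1 =>
    if pos < n then pvInnerA c source (pos + 1) n (pos :: back) ([source, pos] :: accRev)
    else (pos, back, accRev)

-- used by pvOuterA's decreasing_by: the inner loop moves nodes from the iterator to the queue
theorem pvInnerA_len (cnt : Nat) (source : Int) (pos n : Int) (back : List Int)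
    (accRev : List (List Int)) :
    (n - (pvInnerA cnt source pos n back accRev).1).toNat
      + (pvInnerA cnt source pos n back accRev).2.1.length
      = (n - pos).toNat + back.length := by
  induction cnt generalizing pos back accRev with
  | zero => simp [pvInnerA]
  | succ c ih =>
    by_cases h : pos < n
    · simp only [pvInnerA, if_pos h, ih]
      simp only [List.length_cons]
      omega
    · simp [pvInnerA, if_neg h]

-- 'while parents: source = parents.pop(0); <inner>; if first_time: r -= 1; first_time = False'
def pvOuterA (pos n : Int) (front back : List Int) (r : Int) (first : Bool)
    (accRev : List (List Int)) : List (List Int) :=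
  match front with
  | source :: f =>
    pvOuterA (pvInnerA r.toNat source pos n back accRev).1 n f
      (pvInnerA r.toNat source pos n back accRev).2.1
      (if first then r - 1 else r) false
      (pvInnerA r.toNat source pos n back accRev).2.2
  | [] =>
    match hrev : back.reverse with
    | [] => accRev.reverse
    | source :: f =>
      pvOuterA (pvInnerA r.toNat source pos n [] accRev).1 n f
        (pvInnerA r.toNat source pos n [] accRev).2.1
        (if first then r - 1 else r) false
        (pvInnerA r.toNat source pos n [] accRev).2.2
termination_by (n - pos).toNat + front.length + back.length
decreasing_by
  · have h := pvInnerA_len r.toNat source pos n back accRev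
    simp only [List.length_cons]
    omega
  · have h := pvInnerA_len r.toNat source pos n [] accRev
    have h2 : back.length = f.length + 1 := by
      have := congrArg List.length hrev
      simpa using this
    simp only [List.length_nil] at h
    omega

def tree_edges_py (n : Int) (r : Int) : List (List Int) :=
  if n == 0 then []
  else if n < 0 then []  -- 'parents = [next(nodes)]' raises in Python here; outside Pre_
  else pvOuterA 1 n [0] [] (r + 1) true []  -- root 0 consumed; the iterator stands at 1

-- ===== PORT B =====
def tree_edges_py_alt (n : Int) (r : Int) : List (List Int) :=
  if 1 ≤ r then
    (PySem.List.pyRange 1 n 1).map (fun t =>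
      [if t ≤ r + 1 then 0 else 1 + PySem.Int.floordiv (t - (r + 2)) r, t])
  else
    (PySem.List.pyRange 1 (min (r + 2) n) 1).map (fun t => [0, t])

-- ===== PRECONDITION & SPEC =====
-- Pre_ excludes only n < 0, where A raises RuntimeError (StopIteration from the
-- generator's initial next() on an empty range) and so returns no value.
def Pre_tree_edges_py (n : Int) (r : Int) : Prop := 0 ≤ n
instance (n : Int) (r : Int) : Decidable (Pre_tree_edges_py n r) := by unfold Pre_tree_edges_py; infer_instance
def pvWitness_tree_edges_py : Int × Int := (10, 2)

def Spec_tree_edges_py (n : Int) (r : Int) (out : List (List Int)) : Prop := out = tree_edges_py_alt n r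
instance (n : Int) (r : Int) (out : List (List Int)) : Decidable (Spec_tree_edges_py n r out) := by unfold Spec_tree_edges_py; infer_instance

-- ===== CLAIM (what is proved, stated in full; the proofs are below) =====
def Claim_equal_tree_edges_py : Prop := ∀ (n : Int) (r : Int), Dom_tree_edges_py n r → Pre_tree_edges_py n r → Spec_tree_edges_py n r (tree_edges_py n r)

-- ===== LEMMAS AND PROOFS =====

theorem pvInnerA_range (c : Nat) (s m n : Int) (back : List Int) (accRev : List (List Int)) :
    pvInnerA c s m n back accRev
      = (max m (min (m + c) n),
         (PySem.List.pyRange m (max m (min (m + c) n)) 1).reverse ++ back,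
         ((PySem.List.pyRange m (max m (min (m + c) n)) 1).map (fun t => [s, t])).reverse
           ++ accRev) := by
  induction c generalizing m back accRev with
  | zero =>
    have e : max m (min (m + ((0:Nat):Int)) n) = m := by omega
    rw [e]
    simp [pvInnerA, PySem.List.pyRange_one_eq_nil (le_refl m)]
  | succ c ih =>
    by_cases hmn : m < n
    · have e : max m (min (m + ((c:Int) + 1)) n) = min (m + ((c:Int) + 1)) n := by omega
      have e' : max (m + 1) (min (m + 1 + (c:Int)) n) = min (m + ((c:Int) + 1)) n := by omega
      have hcons : PySem.List.pyRange m (min (m + ((c:Int) + 1)) n) 1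
          = m :: PySem.List.pyRange (m + 1) (min (m + ((c:Int) + 1)) n) 1 :=
        PySem.List.pyRange_one_cons (by omega)
      rw [pvInnerA, if_pos hmn, ih]
      push_cast
      rw [e, e', hcons]
      simp
    · have e : max m (min (m + ((c:Int) + 1)) n) = m := by omega
      rw [pvInnerA, if_neg hmn]
      push_cast
      rw [e]
      simp [PySem.List.pyRange_one_eq_nil (le_refl m)]

-- one steady-state BFS step: popping source j takes the next targets (each with parent
-- j = the closed form) and moves the iterator from p toward (j+1)*r+2
theorem pvStep (n r : Int) (hr : 1 ≤ r) (j a p : Int) (hj : 1 ≤ j) (_hja : j + 1 ≤ a)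
    (ha : a ≤ min (j * r + 2) n) (hp : p = j * r + 2 ∨ (n ≤ p ∧ p ≤ j * r + 2))
    (accRev : List (List Int)) :
    pvInnerA r.toNat j p n ((PySem.List.pyRange a (min (j * r + 2) n) 1).reverse) accRev
      = (max p (min (p + r) n),
         (PySem.List.pyRange a (min ((j + 1) * r + 2) n) 1).reverse,
         ((PySem.List.pyRange (j * r + 2) (min ((j + 1) * r + 2) n) 1).map
             (fun t => [1 + PySem.Int.floordiv (t - (r + 2)) r, t])).reverse ++ accRev) := by
  have hcast : ((r.toNat : Int)) = r := Int.toNat_of_nonneg (by omega)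
  have e1 : j * r + 2 + r = (j + 1) * r + 2 := by ring
  have hjr : j ≤ j * r := le_mul_of_one_le_right (by omega) hr
  rw [pvInnerA_range, hcast]
  have hcr : PySem.List.pyRange p (max p (min (p + r) n)) 1
      = PySem.List.pyRange (j * r + 2) (min ((j + 1) * r + 2) n) 1 := by
    rcases hp with hp | hp
    · subst hp
      by_cases hb : n ≤ j * r + 2
      · rw [PySem.List.pyRange_one_eq_nil (by omega),
            PySem.List.pyRange_one_eq_nil (le_trans (min_le_right _ _) hb)]
      · have e : max (j * r + 2) (min (j * r + 2 + r) n) = min ((j + 1) * r + 2) n := by omega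
        rw [e]
    · rw [PySem.List.pyRange_one_eq_nil (by omega),
          PySem.List.pyRange_one_eq_nil (le_trans (min_le_right _ _) (by omega))]
  rw [hcr]
  have hq : (PySem.List.pyRange (j * r + 2) (min ((j + 1) * r + 2) n) 1).reverse
        ++ (PySem.List.pyRange a (min (j * r + 2) n) 1).reverse
      = (PySem.List.pyRange a (min ((j + 1) * r + 2) n) 1).reverse := by
    rw [← List.reverse_append]
    congr 1
    by_cases hb : n ≤ j * r + 2
    · have h2 : PySem.List.pyRange (j * r + 2) (min ((j + 1) * r + 2) n) 1 = [] :=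
        PySem.List.pyRange_one_eq_nil (le_trans (min_le_right _ _) hb)
      have emin1 : min (j * r + 2) n = n := by omega
      have emin2 : min ((j + 1) * r + 2) n = n := min_eq_right (by rw [← e1]; omega)
      rw [h2, emin1, emin2]; simp
    · have emin1 : min (j * r + 2) n = j * r + 2 := by omega
      rw [emin1, ← PySem.List.pyRange_one_append a (j * r + 2) (min ((j + 1) * r + 2) n)
        (by omega) (le_min (by rw [← e1]; omega) (by omega))]
  have he : (PySem.List.pyRange (j * r + 2) (min ((j + 1) * r + 2) n) 1).map (fun t => [j, t])
      = (PySem.List.pyRange (j * r + 2) (min ((j + 1) * r + 2) n) 1).map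
          (fun t => [1 + PySem.Int.floordiv (t - (r + 2)) r, t]) := by
    apply List.map_congr_left
    intro t ht
    rw [PySem.List.mem_pyRange_one] at ht
    have ht2 : t < (j + 1) * r + 2 := lt_of_lt_of_le ht.2 (min_le_left _ _)
    have hfd : PySem.Int.floordiv (t - (r + 2)) r = j - 1 := by
      rw [PySem.Int.floordiv_eq_iff_of_pos (by omega)]
      constructor <;> nlinarith [ht.1, ht2]
    rw [hfd]; ring_nf
  rw [hq, he]

theorem pvOuterA_steady (n r : Int) (hr : 1 ≤ r) (k : Nat) :
    ∀ (j a p : Int) (accRev : List (List Int)), 1 ≤ j → j ≤ a → a ≤ min (j * r + 2) n →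
      (p = j * r + 2 ∨ (n ≤ p ∧ p ≤ j * r + 2)) → (n - j).toNat ≤ k →
    pvOuterA p n (PySem.List.pyRange j a 1)
        ((PySem.List.pyRange a (min (j * r + 2) n) 1).reverse) r false accRev
      = accRev.reverse ++ (PySem.List.pyRange (j * r + 2) n 1).map
          (fun t => [1 + PySem.Int.floordiv (t - (r + 2)) r, t]) := by
  induction k with
  | zero =>
    intro j a p accRev hj hja ha hp hk
    have hnj : n ≤ j := by omega
    have hjr : j ≤ j * r := le_mul_of_one_le_right (by omega) hr
    have hm := min_le_right (j * r + 2) n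
    have hf : PySem.List.pyRange j a 1 = [] := PySem.List.pyRange_one_eq_nil (by omega)
    have hb : PySem.List.pyRange a (min (j * r + 2) n) 1 = [] :=
      PySem.List.pyRange_one_eq_nil (by omega)
    have hn : PySem.List.pyRange (j * r + 2) n 1 = [] :=
      PySem.List.pyRange_one_eq_nil (by omega)
    rw [hf, hb, hn, pvOuterA]; simp
  | succ k ih =>
    intro j a p accRev hj hja ha hp hk
    have hjr : j ≤ j * r := le_mul_of_one_le_right (by omega) hr
    have e1 : j * r + 2 + r = (j + 1) * r + 2 := by ring
    by_cases hnj : n ≤ j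
    · have hm := min_le_right (j * r + 2) n
      have hf : PySem.List.pyRange j a 1 = [] := PySem.List.pyRange_one_eq_nil (by omega)
      have hb : PySem.List.pyRange a (min (j * r + 2) n) 1 = [] :=
        PySem.List.pyRange_one_eq_nil (by omega)
      have hn : PySem.List.pyRange (j * r + 2) n 1 = [] :=
        PySem.List.pyRange_one_eq_nil (by omega)
      rw [hf, hb, hn, pvOuterA]; simp
    · replace hnj : j < n := by omega
      have hp' : max p (min (p + r) n) = (j + 1) * r + 2
          ∨ (n ≤ max p (min (p + r) n) ∧ max p (min (p + r) n) ≤ (j + 1) * r + 2) := by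
        rcases hp with hp | hp <;> omega
      by_cases hfa : j < a
      · -- the popped source j is at the head of the queue's front list
        have hf : PySem.List.pyRange j a 1 = j :: PySem.List.pyRange (j + 1) a 1 :=
          PySem.List.pyRange_one_cons hfa
        rw [hf, pvOuterA, pvStep n r hr j a p hj (by omega) ha hp]
        simp only [Bool.false_eq_true, if_false]
        rw [ih (j + 1) a _ _ (by omega) (by omega)
          (le_min (le_trans (le_min_iff.mp ha).1 (by rw [← e1]; omega)) (le_min_iff.mp ha).2)
          hp' (by omega)]
        rw [List.reverse_append, List.reverse_reverse, List.append_assoc, ← List.map_append]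
        congr 2
        by_cases hb : n ≤ (j + 1) * r + 2
        · have h2 : PySem.List.pyRange ((j + 1) * r + 2) n 1 = [] :=
            PySem.List.pyRange_one_eq_nil (by omega)
          have emin : min ((j + 1) * r + 2) n = n := by omega
          rw [h2, emin]; simp
        · have emin : min ((j + 1) * r + 2) n = (j + 1) * r + 2 := by omega
          rw [emin, ← PySem.List.pyRange_one_append (j * r + 2) ((j + 1) * r + 2) n
            (by rw [← e1]; omega) (by omega)]
      · -- front exhausted: the queue refills from back.reverse, then pops j
        have hae : a = j := by omega
        rw [hae]
        have hf : PySem.List.pyRange j j 1 = [] := PySem.List.pyRange_one_eq_nil (le_refl _)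
        have hbm : j < min (j * r + 2) n := by omega
        have hb : PySem.List.pyRange j (min (j * r + 2) n) 1
            = j :: PySem.List.pyRange (j + 1) (min (j * r + 2) n) 1 :=
          PySem.List.pyRange_one_cons hbm
        rw [hf, pvOuterA, List.reverse_reverse, hb]
        dsimp only
        have hstep := pvStep n r hr j (min (j * r + 2) n) p hj (by omega) (le_refl _) hp accRev
        rw [show ((PySem.List.pyRange (min (j * r + 2) n) (min (j * r + 2) n) 1).reverse
              = ([] : List Int)) from by rw [PySem.List.pyRange_one_eq_nil (le_refl _)]; rfl] at hstep
        rw [hstep]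
        simp only [Bool.false_eq_true, if_false]
        rw [ih (j + 1) (min (j * r + 2) n) _ _ (by omega) (by omega)
          (le_min (le_trans (min_le_left _ _) (by rw [← e1]; omega)) (min_le_right _ _))
          hp' (by omega)]
        rw [List.reverse_append, List.reverse_reverse, List.append_assoc, ← List.map_append]
        congr 2
        by_cases hbn : n ≤ (j + 1) * r + 2
        · have h2 : PySem.List.pyRange ((j + 1) * r + 2) n 1 = [] :=
            PySem.List.pyRange_one_eq_nil (by omega)
          have emin : min ((j + 1) * r + 2) n = n := by omega
          rw [h2, emin]; simp
        · have emin : min ((j + 1) * r + 2) n = (j + 1) * r + 2 := by omega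
          rw [emin, ← PySem.List.pyRange_one_append (j * r + 2) ((j + 1) * r + 2) n
            (by rw [← e1]; omega) (by omega)]

theorem pvOuterA_nil_nil (pos n : Int) (r : Int) (first : Bool) (acc : List (List Int)) :
    pvOuterA pos n [] [] r first acc = acc.reverse := by
  rw [pvOuterA.eq_def]; simp

theorem pvOuterA_zero_single (pos n : Int) (s : Int) (acc : List (List Int)) :
    pvOuterA pos n [] [s] 0 false acc = acc.reverse := by
  rw [pvOuterA.eq_def]
  split
  · simp_all
  · split
    · simp_all
    · next source f h =>
      simp at h
      obtain ⟨rfl, rfl⟩ := h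
      norm_num [pvInnerA]
      exact pvOuterA_nil_nil pos n 0 false acc

-- A on n ≥ 1, r ≥ 1 equals B: the root step then the steady-state invariant
theorem treeA_eq_B_pos (n r : Int) (hn : 1 ≤ n) (hr : 1 ≤ r) :
    pvOuterA 1 n [0] [] (r + 1) true []
      = (PySem.List.pyRange 1 n 1).map (fun t =>
          [if t ≤ r + 1 then 0 else 1 + PySem.Int.floordiv (t - (r + 2)) r, t]) := by
  rw [pvOuterA]
  have hcast : (((r + 1).toNat : Int)) = r + 1 := Int.toNat_of_nonneg (by omega)
  rw [pvInnerA_range, hcast]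
  simp only [if_true]
  have e2 : r + 1 - 1 = r := by ring
  have emax : max 1 (min (1 + (r + 1)) n) = min (1 * r + 2) n := by omega
  rw [emax]
  simp only [List.append_nil, e2]
  have h11 : PySem.List.pyRange 1 1 1 = ([] : List Int) := by decide
  have hst := fun acc => pvOuterA_steady n r hr ((n - 1).toNat) 1 1 (min (1 * r + 2) n) acc
    (le_refl _) (le_refl _) (le_min (by omega) (by omega))
    (by omega) (le_refl _)
  simp only [h11] at hst
  rw [hst]
  rw [List.reverse_reverse]
  have hm1 : (1 : Int) ≤ min (1 * r + 2) n := by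
    have := min_le_left (1 * r + 2) n; omega
  rw [PySem.List.pyRange_one_append 1 (min (1 * r + 2) n) n hm1 (min_le_right _ _), List.map_append]
  congr 1
  · apply List.map_congr_left
    intro t ht
    rw [PySem.List.mem_pyRange_one] at ht
    have : t ≤ r + 1 := by
      have := ht.2; have := min_le_left (1 * r + 2) n; omega
    rw [if_pos this]
  · have erange : PySem.List.pyRange (min (1 * r + 2) n) n 1 = PySem.List.pyRange (1 * r + 2) n 1 := by
      by_cases hb : n ≤ 1 * r + 2
      · rw [min_eq_right hb, PySem.List.pyRange_one_eq_nil (le_refl _),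
            PySem.List.pyRange_one_eq_nil hb]
      · rw [min_eq_left (by omega)]
    rw [erange]
    apply List.map_congr_left
    intro t ht
    rw [PySem.List.mem_pyRange_one] at ht
    rw [if_neg (by omega)]

theorem tree_edges_py_spec : Claim_equal_tree_edges_py := by
  intro n r _ hpre
  unfold Pre_tree_edges_py at hpre
  unfold Spec_tree_edges_py tree_edges_py tree_edges_py_alt
  by_cases hn : n = 0
  · subst hn
    have h0 : PySem.List.pyRange 1 0 1 = [] := by decide
    have h0' : PySem.List.pyRange 1 (min (r + 2) 0) 1 = [] :=
      PySem.List.pyRange_one_eq_nil (le_trans (min_le_right _ _) (by omega))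
    simp [h0, h0']
  · have hn1 : 1 ≤ n := by omega
    simp only [beq_iff_eq, if_neg hn, if_neg (by omega : ¬ n < 0)]
    by_cases hr : 1 ≤ r
    · rw [if_pos hr]
      exact treeA_eq_B_pos n r hn1 hr
    · rw [if_neg hr]
      by_cases hr0 : r = 0
      · subst hr0
        rw [pvOuterA]
        norm_num
        rw [pvInnerA_range]
        norm_num
        by_cases hn2 : 2 ≤ n
        · have emax : max 1 (min (2:Int) n) = 2 := by omega
          have emin : min (2:Int) n = 2 := by omega
          have h12 : PySem.List.pyRange 1 2 1 = [1] := by decide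
          rw [emax, emin, h12]
          simp [pvOuterA_zero_single]
        · have hne : n = 1 := by omega
          subst hne
          norm_num
          simp [pvOuterA_nil_nil]
      · -- r ≤ -1: the inner loop runs zero times, nothing is ever yielded
        have hz : (r + 1).toNat = 0 := by omega
        rw [pvOuterA, hz]
        simp only [pvInnerA]
        rw [pvOuterA_nil_nil]
        rw [PySem.List.pyRange_one_eq_nil (by omega : min (r + 2) n ≤ 1)]
        simp
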